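-- pv_equiv track=rewrite | github.com/acalio/gnn-diffusion | dgl-diffusion/dgl_diffusion/data.py | counting_weight
-- ===== SOURCE A (Python) =====
-- from collections import defaultdict
-- from functools import reduce
-- from collections import deque
-- from copy import copy
--
-- def counting_weight(cascades, time_window=0):
--     """ Counting strategy
--
--     The correlations between any pair of nodes
--     activation is considered only within a particular
--     time frame.
--
--     For example, if a node is active at time t, it will be
--     accountable for any further activation up until
--     t + time_window
--
--     If time_window is 0 then any node is accountable
--     for every subsequent activations
--
--     Parameters
--     ----------
--     cascades : list of cascades
--       each cascade is a list of list of int (node indexes)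
--
--     time_window : int, optional, default 0
--       time window
--
--     Returns
--     -------
--     coordinates_dict : dict of dict
--       each entry <u,v> denotes the weight of the corresponding edge
--     """
--     coordinates_dict = defaultdict(lambda: defaultdict(int))
--
--     def inc(u, v):
--         """Increment the counter
--         at the given coordinates
--         """
--         coordinates_dict[u][v] += 1
--
--     time_aware = time_window != 0
--     # iterate over every cascade
--     for cascade in cascades:
--         # set the initial set of active nodes
--         active_nodes = copy(cascade[0])
--         # list containing the size of the last time_window activations
--         backward_window = deque(
--             [time_aware*len(active_nodes)] + [0]*(time_window-1))
--         # iterate for every time step of this cascade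
--         for tlist in cascade[1:]:
--             # number of nodes activated in the last time_window time steps
--             back_limit = reduce(lambda x, y: x + y, backward_window)
--
--             _ = [inc(u, v) for u in active_nodes[-back_limit:]
--                  for v in tlist]
--             # add the nodes to the set of active_nodes
--             _ = [active_nodes.append(v) for v in tlist]
--
--             backward_window.pop()
--             backward_window.appendleft(time_aware*len(tlist))
--
--     return coordinates_dict
-- ===== SOURCE B (Python) =====
-- from collections import defaultdict
--
-- def counting_weight(cascades, time_window=0):
--     """Index-based re-implementation: for each step i, count pairs between the
--     groups inside the window cascade[lo:i] and the newly activated cascade[i]."""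
--     counts = defaultdict(lambda: defaultdict(int))
--     for cascade in cascades:
--         for i in range(1, len(cascade)):
--             lo = 0 if time_window == 0 else max(0, i - max(time_window, 1))
--             tlist = cascade[i]
--             for group in cascade[lo:i]:
--                 for u in group:
--                     for v in tlist:
--                         counts[u][v] += 1
--     return counts
-- ===== Notes on version B (the rewrite author's own statement) =====
-- stated objective: simpler
-- what changed: Replaces A's flat active_nodes list, size-deque, reduce and negative-index slicing by direct indexing: for each step i it counts pairs between the groups cascade[lo:i] inside the window and the new group cascade[i].
-- intended difference: When time_window != 0 and every group in the current window is empty but earlier groups are not, A's back_limit is 0 and active_nodes[-0:] accidentally selects ALL previously activated nodes, so A counts correlations far outside the window; B counts nothing there, which is what the time-window contract intends. — e.g. on counting_weight([[[1], [], [2]]], 1): A returns [(1, [(2, 1)])], B returns []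
import Mathlib
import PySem

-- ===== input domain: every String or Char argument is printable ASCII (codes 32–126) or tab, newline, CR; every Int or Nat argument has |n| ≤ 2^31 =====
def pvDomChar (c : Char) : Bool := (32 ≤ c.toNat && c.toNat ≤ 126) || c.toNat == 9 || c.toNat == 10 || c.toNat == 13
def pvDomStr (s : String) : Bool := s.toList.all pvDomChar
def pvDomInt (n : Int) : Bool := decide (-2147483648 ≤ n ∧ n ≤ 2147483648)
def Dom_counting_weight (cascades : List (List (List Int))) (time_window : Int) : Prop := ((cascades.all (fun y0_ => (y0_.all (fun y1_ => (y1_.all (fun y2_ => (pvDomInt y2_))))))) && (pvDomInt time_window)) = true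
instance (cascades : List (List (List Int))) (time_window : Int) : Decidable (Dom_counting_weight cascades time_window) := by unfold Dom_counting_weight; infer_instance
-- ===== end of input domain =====

-- B replaces A's flat active_nodes list + size-deque + reduce + negative slicing by direct
-- index-window counting (simpler); on the window-all-empty corner A leaks all past nodes (see D_).


-- ===== PORT A =====
-- coordinates_dict[u][v] += 1 on a defaultdict(lambda: defaultdict(int))
def pvInc (d : PySem.Dict Int (PySem.Dict Int Int)) (u v : Int) : PySem.Dict Int (PySem.Dict Int Int) :=
  let inner := d.getD u PySem.Dict.empty
  d.insert u (inner.insert v (inner.getD v 0 + 1))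

-- one iteration of A's `for tlist in cascade[1:]`; state = (dict, active_nodes, backward_window)
def pvStepA (time_aware : Int)
    (st : PySem.Dict Int (PySem.Dict Int Int) × List Int × List Int) (tlist : List Int) :
    PySem.Dict Int (PySem.Dict Int Int) × List Int × List Int :=
  let back_limit := st.2.2.foldl (· + ·) 0        -- reduce(+) on the (always nonempty) deque = its sum
  let d := (PySem.List.slice st.2.1 (some (-back_limit)) none).foldl
      (fun d u => tlist.foldl (fun d v => pvInc d u v) d) st.1
  (d, st.2.1 ++ tlist, time_aware * (tlist.length : Int) :: st.2.2.dropLast)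

def pvCascadeA (time_window : Int) (d : PySem.Dict Int (PySem.Dict Int Int))
    (cascade : List (List Int)) : PySem.Dict Int (PySem.Dict Int Int) :=
  let time_aware : Int := if time_window ≠ 0 then 1 else 0
  let active_nodes := (PySem.List.pyGet? cascade 0).getD []   -- cascade[0]; none (IndexError) is outside Pre_
  let backward_window : List Int :=
    [time_aware * (active_nodes.length : Int)] ++ List.replicate (time_window - 1).toNat 0
  ((PySem.List.slice cascade (some 1) none).foldl (pvStepA time_aware)
      (d, active_nodes, backward_window)).1

def counting_weight (cascades : List (List (List Int))) (time_window : Int) :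
    List (Int × List (Int × Int)) :=
  ((cascades.foldl (pvCascadeA time_window) PySem.Dict.empty).items).map
    (fun p => (p.1, p.2.items))

-- ===== PORT B =====
-- one iteration of B's `for i in range(1, len(cascade))`
def pvStepB (time_window : Int) (cascade : List (List Int))
    (d : PySem.Dict Int (PySem.Dict Int Int)) (i : Int) : PySem.Dict Int (PySem.Dict Int Int) :=
  let lo : Int := if time_window = 0 then 0 else max 0 (i - max time_window 1)
  let tlist := PySem.List.pyGetD cascade i []
  (PySem.List.slice cascade (some lo) (some i)).foldl
    (fun d group => group.foldl (fun d u => tlist.foldl (fun d v => pvInc d u v) d) d) d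

def counting_weight_alt (cascades : List (List (List Int))) (time_window : Int) :
    List (Int × List (Int × Int)) :=
  ((cascades.foldl
      (fun d cascade =>
        (PySem.List.pyRange 1 (cascade.length : Int) 1).foldl (pvStepB time_window cascade) d)
      PySem.Dict.empty).items).map
    (fun p => (p.1, p.2.items))

-- ===== PRECONDITION & SPEC =====
-- A raises IndexError on cascade[0] whenever some cascade is empty; those inputs are excluded.
def Pre_counting_weight (cascades : List (List (List Int))) (time_window : Int) : Prop :=
  ∀ c ∈ cascades, c ≠ []
instance (cascades : List (List (List Int))) (time_window : Int) :
    Decidable (Pre_counting_weight cascades time_window) := by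
  unfold Pre_counting_weight; infer_instance
def pvWitness_counting_weight : List (List (List Int)) × Int := ([[[1], [2]]], 0)

-- When time_window ≠ 0 and at some step every group in the window is empty while earlier groups
-- are not, A's back_limit is 0 and active_nodes[-0:] selects ALL past nodes, counting correlations
-- outside the window; B counts nothing there, which the time-window contract intends.
def D_counting_weight (cascades : List (List (List Int))) (time_window : Int) : Prop :=
  time_window ≠ 0 ∧ ∃ c ∈ cascades, ∃ i ∈ List.range c.length, 1 ≤ i ∧
    c.getD i [] ≠ [] ∧
    ((c.take i).drop (i - (max time_window 1).toNat)).flatten = [] ∧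
    (c.take (i - (max time_window 1).toNat)).flatten ≠ []
instance (cascades : List (List (List Int))) (time_window : Int) :
    Decidable (D_counting_weight cascades time_window) := by
  unfold D_counting_weight; infer_instance

def Spec_counting_weight (cascades : List (List (List Int))) (time_window : Int)
    (out : List (Int × List (Int × Int))) : Prop :=
  ¬ D_counting_weight cascades time_window → out = counting_weight_alt cascades time_window
instance (cascades : List (List (List Int))) (time_window : Int)
    (out : List (Int × List (Int × Int))) : Decidable (Spec_counting_weight cascades time_window out) := by
  unfold Spec_counting_weight; infer_instance

def pvDiffWitness_counting_weight : List (List (List Int)) × Int := ([[[1], [], [2]]], 1)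
def pvDiffWitnessOut_counting_weight :
    (List (Int × List (Int × Int))) × (List (Int × List (Int × Int))) := ([(1, [(2, 1)])], [])

-- ===== CLAIM =====
def Claim_unchanged_counting_weight : Prop := ∀ (cascades : List (List (List Int))) (time_window : Int), Dom_counting_weight cascades time_window → Pre_counting_weight cascades time_window → Spec_counting_weight cascades time_window (counting_weight cascades time_window)
def Claim_changed_counting_weight : Prop := Dom_counting_weight (pvDiffWitness_counting_weight.1) (pvDiffWitness_counting_weight.2) ∧ Pre_counting_weight (pvDiffWitness_counting_weight.1) (pvDiffWitness_counting_weight.2) ∧ D_counting_weight (pvDiffWitness_counting_weight.1) (pvDiffWitness_counting_weight.2) ∧ counting_weight (pvDiffWitness_counting_weight.1) (pvDiffWitness_counting_weight.2) = pvDiffWitnessOut_counting_weight.1 ∧ counting_weight_alt (pvDiffWitness_counting_weight.1) (pvDiffWitness_counting_weight.2) = pvDiffWitnessOut_counting_weight.2 ∧ pvDiffWitnessOut_counting_weight.1 ≠ pvDiffWitnessOut_counting_weight.2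
def Claim_exact_counting_weight : Prop := ∀ (cascades : List (List (List Int))) (time_window : Int), Dom_counting_weight cascades time_window → Pre_counting_weight cascades time_window → D_counting_weight cascades time_window → counting_weight cascades time_window ≠ counting_weight_alt cascades time_window

-- ===== LEMMAS AND PROOFS =====

-- the content of A's backward_window deque before processing step i (newest size first):
-- the lengths of the window's groups, newest first, padded with zeros up to the deque's size.
def pvBW (time_window : Int) (cl : List (List Int)) (i : Nat) : List Int :=
  if time_window = 0 then [0]
  else ((((cl.take i).drop (i - (max time_window 1).toNat)).reverse
          ++ List.replicate ((max time_window 1).toNat - i) ([] : List Int)).map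
        (fun g => (g.length : Int)))

lemma pvW_pos (tw : Int) : 1 ≤ (max tw 1).toNat := by
  have : (1:Int) ≤ max tw 1 := le_max_right _ _
  omega

lemma pvBW_succ (tw : Int) (cl : List (List Int)) (i : Nat) (hi : i < cl.length) :
    pvBW tw cl (i+1)
      = (if tw ≠ 0 then 1 else 0) * ((cl.getD i []).length : Int) :: (pvBW tw cl i).dropLast := by
  unfold pvBW
  by_cases h : tw = 0
  · simp [h]
  · simp only [h, if_neg, ite_false, ne_eq, not_false_iff, if_true, one_mul]
    set W := (max tw 1).toNat with hW
    have hW1 : 1 ≤ W := pvW_pos tw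
    have hgetD : cl.getD i [] = cl[i] := List.getD_eq_getElem cl [] hi
    have htake : cl.take (i+1) = cl.take i ++ [cl[i]] := List.take_succ_eq_append_getElem hi
    rcases lt_or_ge i W with hiW | hiW
    · have h1 : i - W = 0 := by omega
      have h2 : i + 1 - W = 0 := by omega
      have h3 : W - i = (W - i - 1) + 1 := by omega
      rw [h1, h2, h3, htake, hgetD]
      simp [List.dropLast_append_of_ne_nil, List.dropLast_replicate]
      rw [List.take_succ_eq_append_getElem (by simpa using hi)]
      simp [Nat.sub_sub]
    · have h1 : W - i = 0 := by omega
      have h2 : W - (i+1) = 0 := by omega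
      have h3 : i + 1 - W = (i - W) + 1 := by omega
      rw [h1, h2, h3, htake, hgetD]
      have h4 : i - W + 1 ≤ (cl.take i).length := by simp; omega
      rw [List.drop_append_of_le_length h4]
      simp [List.dropLast_reverse, List.tail_drop]

lemma pvBW_sum (tw : Int) (cl : List (List Int)) (i : Nat) (h : tw ≠ 0) :
    (pvBW tw cl i).foldl (· + ·) 0
      = ((((cl.take i).drop (i - (max tw 1).toNat)).flatten.length : Nat) : Int) := by
  unfold pvBW
  rw [if_neg h, ← List.sum_eq_foldl]
  push_cast [List.length_flatten]
  simp [List.sum_reverse, Function.comp_def]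

lemma pvTake_split (cl : List (List Int)) (i j : Nat) (h : j ≤ i) :
    (cl.take i).flatten = (cl.take j).flatten ++ ((cl.take i).drop j).flatten := by
  conv_lhs => rw [← List.take_append_drop j (cl.take i)]
  rw [List.flatten_append, List.take_take, min_eq_left h]

lemma pvLo_cast (tw : Int) (i : Nat) (h : tw ≠ 0) :
    max 0 ((i : Int) - max tw 1) = ((i - (max tw 1).toNat : Nat) : Int) := by
  have h0 : (0:Int) ≤ max tw 1 := le_trans zero_le_one (le_max_right _ _)
  have := Int.toNat_of_nonneg h0
  omega

lemma pvSlice_win (tw : Int) (cl : List (List Int)) (i : Nat) :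
    PySem.List.slice cl (some (if tw = 0 then 0 else max 0 ((i:Int) - max tw 1))) (some (i:Int))
      = (cl.take i).drop (if tw = 0 then 0 else i - (max tw 1).toNat) := by
  by_cases h : tw = 0
  · simp [h, PySem.List.slice_to_natCast]
  · rw [if_neg h, if_neg h, pvLo_cast tw i h, PySem.List.slice_natCast, List.drop_take]

lemma pvStep_eq (tw : Int) (cl : List (List Int)) (i : Nat) (hi : i < cl.length) (h1 : 1 ≤ i)
    (hok : tw = 0 ∨ ¬(cl.getD i [] ≠ [] ∧ ((cl.take i).drop (i - (max tw 1).toNat)).flatten = []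
        ∧ (cl.take (i - (max tw 1).toNat)).flatten ≠ []))
    (d : PySem.Dict Int (PySem.Dict Int Int)) :
    pvStepA (if tw ≠ 0 then 1 else 0) (d, (cl.take i).flatten, pvBW tw cl i) (cl.getD i [])
      = (pvStepB tw cl d (i : Int), (cl.take (i+1)).flatten, pvBW tw cl (i+1)) := by
  have hgetD : cl.getD i [] = cl[i] := List.getD_eq_getElem cl [] hi
  have htl : PySem.List.pyGetD cl (i:Int) [] = cl.getD i [] := by
    simp [PySem.List.pyGetD_natCast]
  have hB : pvStepB tw cl d (i : Int)
      = (((cl.take i).drop (if tw = 0 then 0 else i - (max tw 1).toNat)).flatten).foldl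
          (fun d u => (cl.getD i []).foldl (fun d v => pvInc d u v) d) d := by
    simp only [pvStepB, htl, pvSlice_win, List.foldl_flatten]
  simp only [pvStepA, Prod.mk.injEq]
  refine ⟨?_, ?_, ?_⟩
  · rw [hB]
    by_cases h : tw = 0
    · -- back_limit = 0, window = everything
      simp only [h, pvBW, if_pos, ite_true]
      norm_num [PySem.List.slice_none_none]
    · -- back_limit = length of the flattened window
      rw [pvBW_sum tw cl i h, if_neg h]
      set W := (max tw 1).toNat with hW
      set win := (cl.take i).drop (i - W) with hwin
      have hsplit : (cl.take i).flatten = (cl.take (i - W)).flatten ++ win.flatten :=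
        pvTake_split cl i (i - W) (Nat.sub_le _ _)
      rcases hn : win.flatten.length with _ | m
      · -- empty window
        have hwe : win.flatten = [] := List.eq_nil_of_length_eq_zero hn
        rcases hok with h0 | hok
        · exact absurd h0 h
        by_cases htl0 : cl.getD i [] = []
        · -- nothing to count on either side
          rw [htl0]
          simp only [List.foldl_nil]
          rw [List.foldl_fixed, List.foldl_fixed]
        · have hpre : (cl.take (i - W)).flatten = [] := by
            by_contra hne
            exact hok ⟨htl0, hwe, hne⟩
          have hact : (cl.take i).flatten = ([] : List Int) := by
            rw [hsplit, hpre, hwe]; rfl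
          simp [hact, hwe, PySem.List.slice]
      · -- nonempty window: xs[-b:] is exactly the window
        rw [PySem.List.slice_from_neg_natCast _ (m+1) (Nat.succ_pos m), hsplit,
          List.length_append, hn]
        have hlen : (cl.take (i - W)).flatten.length + (m+1) - (m+1)
            = (cl.take (i - W)).flatten.length := by omega
        rw [hlen, List.drop_left]
  · rw [List.take_succ_eq_append_getElem hi, List.flatten_append, hgetD]; simp
  · rw [pvBW_succ tw cl i hi]

lemma pvLoop_eq (tw : Int) (cl : List (List Int))
    (hok : tw = 0 ∨ ∀ i : Nat, 1 ≤ i → i < cl.length →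
        ¬(cl.getD i [] ≠ [] ∧ ((cl.take i).drop (i - (max tw 1).toNat)).flatten = []
          ∧ (cl.take (i - (max tw 1).toNat)).flatten ≠ [])) :
    ∀ (n i : Nat) (d : PySem.Dict Int (PySem.Dict Int Int)), i + n = cl.length → 1 ≤ i →
    ((cl.drop i).foldl (pvStepA (if tw ≠ 0 then 1 else 0))
        (d, (cl.take i).flatten, pvBW tw cl i)).1
      = (PySem.List.pyRange (i : Int) (cl.length : Int) 1).foldl (pvStepB tw cl) d := by
  intro n
  induction n with
  | zero =>
    intro i d hlen h1
    have hd : cl.drop i = [] := by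
      apply List.drop_eq_nil_of_le; omega
    have hr : PySem.List.pyRange (i : Int) (cl.length : Int) 1 = [] :=
      PySem.List.pyRange_one_eq_nil (by exact_mod_cast (by omega : cl.length ≤ i))
    rw [hd, hr]
    rfl
  | succ n ih =>
    intro i d hlen h1
    have hi : i < cl.length := by omega
    have hoki : tw = 0 ∨ ¬(cl.getD i [] ≠ [] ∧ ((cl.take i).drop (i - (max tw 1).toNat)).flatten = []
        ∧ (cl.take (i - (max tw 1).toNat)).flatten ≠ []) := by
      rcases hok with h0 | hok
      · exact Or.inl h0
      · exact Or.inr (hok i h1 hi)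
    rw [List.drop_eq_getElem_cons hi,
      PySem.List.pyRange_one_cons (by exact_mod_cast hi)]
    simp only [List.foldl_cons]
    have hgetD : cl[i] = cl.getD i [] := (List.getD_eq_getElem cl [] hi).symm
    rw [hgetD, pvStep_eq tw cl i hi h1 hoki d]
    have hcast : ((i+1 : Nat) : Int) = (i : Int) + 1 := by push_cast; ring
    have := ih (i+1) (pvStepB tw cl d (i : Int)) (by omega) (by omega)
    rw [hcast] at this
    exact this

lemma pvCascade_eq (tw : Int) (cl : List (List Int)) (hne : cl ≠ [])
    (hok : tw = 0 ∨ ∀ i : Nat, 1 ≤ i → i < cl.length →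
        ¬(cl.getD i [] ≠ [] ∧ ((cl.take i).drop (i - (max tw 1).toNat)).flatten = []
          ∧ (cl.take (i - (max tw 1).toNat)).flatten ≠ []))
    (d : PySem.Dict Int (PySem.Dict Int Int)) :
    pvCascadeA tw d cl
      = (PySem.List.pyRange 1 (cl.length : Int) 1).foldl (pvStepB tw cl) d := by
  obtain ⟨g, rest, rfl⟩ := List.exists_cons_of_ne_nil hne
  unfold pvCascadeA
  have h0 : (PySem.List.pyGet? (g :: rest) 0).getD [] = g := by
    simp [PySem.List.pyGet?, PySem.List.pyIdx?]
  have hact : g = ((g :: rest).take 1).flatten := by simp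
  have hslice : PySem.List.slice (g :: rest) (some 1) none = (g :: rest).drop 1 := by
    rw [PySem.List.slice_from_one]; rfl
  have hbw : [(if tw ≠ 0 then 1 else 0) * ((g.length : Nat) : Int)]
      ++ List.replicate (tw - 1).toNat 0 = pvBW tw (g :: rest) 1 := by
    by_cases h : tw = 0
    · simp [h, pvBW]
    · have hW1 : 1 ≤ (max tw 1).toNat := pvW_pos tw
      have hW0 : (0:Int) ≤ max tw 1 := le_trans zero_le_one (le_max_right _ _)
      have htN : (tw - 1).toNat = (max tw 1).toNat - 1 := by
        have := Int.toNat_of_nonneg hW0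
        omega
      simp [h, pvBW, htN, List.replicate_succ]
  simp only [pvCascadeA]
  rw [h0, hslice]
  have hstate : ((d, g, [(if tw ≠ 0 then 1 else 0) * ((g.length : Nat) : Int)]
        ++ List.replicate (tw - 1).toNat 0) :
        PySem.Dict Int (PySem.Dict Int Int) × List Int × List Int)
      = (d, ((g :: rest).take 1).flatten, pvBW tw (g :: rest) 1) := by
    rw [hbw]
    simp
  rw [hstate]
  have := pvLoop_eq tw (g :: rest) hok rest.length 1 d (by rw [List.length_cons]; omega) (le_refl 1)
  simpa using this

-- ===== tightness: inside D_ the two results always differ (A strictly over-counts) =====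

-- total number of increments recorded in a (nested) counting dict
def pvSumV (m : PySem.Dict Int Int) : Int := (m.items.map (fun p => p.2)).sum
def pvTotal (d : PySem.Dict Int (PySem.Dict Int Int)) : Int :=
  (d.items.map (fun p => pvSumV p.2)).sum
def pvInv (d : PySem.Dict Int (PySem.Dict Int Int)) : Prop :=
  d.keys.Nodup ∧ ∀ p ∈ d.items, (p.2 : PySem.Dict Int Int).keys.Nodup

lemma pvListReplace {ν : Type} (w : ν → Int) (k : Int) (val : ν) :
    ∀ l : List (Int × ν), (l.map Prod.fst).Nodup → (l.any (fun p => p.1 == k)) = true →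
    ((l.map (fun p => if p.1 == k then (k, val) else p)).map (fun p => w p.2)).sum
      = (l.map (fun p => w p.2)).sum + w val
        - (((l.find? (fun p => p.1 == k)).map (fun p => w p.2)).getD 0) := by
  intro l
  induction l with
  | nil => simp
  | cons a rest ih =>
    intro hnd hany
    rw [List.map_cons, List.nodup_cons] at hnd
    by_cases hpk : (a.1 == k) = true
    · have hk : a.1 = k := by simpa using hpk
      have hmap : rest.map (fun q => if (q.1 == k) = true then (k, val) else q) = rest := by
        refine (List.map_congr_left ?_).trans (List.map_id rest)
        intro q hq
        have hne : q.1 ≠ k := by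
          intro hqe
          exact hnd.1 (by rw [hk, ← hqe]; exact List.mem_map_of_mem hq)
        simp [hne]
      rw [List.map_cons, if_pos hpk, List.find?_cons_of_pos (a := a) (l := rest) (p := fun q => q.1 == k) hpk, hmap]
      simp only [List.map_cons, List.sum_cons, Option.map_some, Option.getD_some]
      ring
    · have hany' : (rest.any (fun q => q.1 == k)) = true := by
        rcases List.any_eq_true.mp hany with ⟨q, hq, hqk⟩
        rcases List.mem_cons.mp hq with hq1 | hq1
        · exact absurd (hq1 ▸ hqk) (by simpa using hpk)
        · exact List.any_eq_true.mpr ⟨q, hq1, hqk⟩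
      rw [List.map_cons, if_neg hpk, List.find?_cons_of_neg (a := a) (l := rest) (p := fun q => q.1 == k) hpk]
      simp only [List.map_cons, List.sum_cons, ih hnd.2 hany']
      ring

lemma pvWsum_insert {ν : Type} (w : ν → Int) (d : PySem.Dict Int ν) (k : Int) (val : ν)
    (hnd : d.keys.Nodup) :
    ((d.insert k val).items.map (fun p => w p.2)).sum
      = (d.items.map (fun p => w p.2)).sum + w val - (((d.get? k).map w).getD 0) := by
  by_cases hc : d.contains k = true
  · rw [PySem.Dict.items_insert_of_contains d val hc]
    have := pvListReplace w k val d.items (by simpa [PySem.Dict.keys] using hnd)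
      (by simpa [PySem.Dict.contains] using hc)
    rw [this]
    congr 1
    simp only [PySem.Dict.get?, Option.map_map]
    rfl
  · rw [PySem.Dict.items_insert_of_not_contains d val (by simpa using hc)]
    have hget : d.get? k = none := by
      simp only [PySem.Dict.get?]
      rw [List.find?_eq_none.mpr]
      · rfl
      · intro q hq
        simp only [PySem.Dict.contains, List.any_eq_true, not_exists] at hc
        push_neg at hc
        simpa using hc q hq
    simp [hget]

lemma pvGetD_keys_nodup (d : PySem.Dict Int (PySem.Dict Int Int)) (u : Int) (h : pvInv d) :
    (d.getD u PySem.Dict.empty).keys.Nodup := by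
  rcases hg : d.get? u with _ | m
  · simp [PySem.Dict.getD, hg, PySem.Dict.nodup_keys_empty]
  · have hm : ∃ p ∈ d.items, p.2 = m := by
      simp only [PySem.Dict.get?, Option.map_eq_some_iff] at hg
      rcases hg with ⟨p, hp, hp2⟩
      exact ⟨p, List.mem_of_find?_eq_some hp, hp2⟩
    rcases hm with ⟨p, hp, rfl⟩
    simpa [PySem.Dict.getD, hg] using h.2 p hp

lemma pvInc_total (d : PySem.Dict Int (PySem.Dict Int Int)) (u v : Int) (h : pvInv d) :
    pvTotal (pvInc d u v) = pvTotal d + 1 := by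
  have hinner := pvGetD_keys_nodup d u h
  unfold pvInc pvTotal
  rw [pvWsum_insert pvSumV d u _ h.1]
  have hval : pvSumV ((d.getD u PySem.Dict.empty).insert v
      ((d.getD u PySem.Dict.empty).getD v 0 + 1))
      = pvSumV (d.getD u PySem.Dict.empty) + 1 := by
    unfold pvSumV
    rw [pvWsum_insert (fun x => x) _ v _ hinner]
    rcases hg : (d.getD u PySem.Dict.empty).get? v with _ | x
    · simp only [PySem.Dict.getD] at hg ⊢
      simp [hg]
    · simp only [PySem.Dict.getD] at hg ⊢
      simp [hg]
      ring
  rw [hval]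
  rcases hg : d.get? u with _ | m
  · simp only [PySem.Dict.getD, hg]
    simp [show pvSumV PySem.Dict.empty = 0 from rfl]
  · simp only [PySem.Dict.getD, hg]
    simp
    ring

lemma pvInc_inv (d : PySem.Dict Int (PySem.Dict Int Int)) (u v : Int) (h : pvInv d) :
    pvInv (pvInc d u v) := by
  have hinner := pvGetD_keys_nodup d u h
  unfold pvInc
  constructor
  · exact PySem.Dict.nodup_keys_insert _ _ _ h.1
  · intro p hp
    rcases (PySem.Dict.mem_items_insert d u _ p).mp hp with h1 | h1
    · subst h1
      exact PySem.Dict.nodup_keys_insert _ _ _ hinner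
    · exact h.2 p h1.1

lemma pvRow_total (tl : List Int) :
    ∀ (d : PySem.Dict Int (PySem.Dict Int Int)) (u : Int), pvInv d →
    pvTotal (tl.foldl (fun d v => pvInc d u v) d) = pvTotal d + tl.length
      ∧ pvInv (tl.foldl (fun d v => pvInc d u v) d) := by
  induction tl with
  | nil => intro d u h; exact ⟨by simp, by simpa using h⟩
  | cons v rest ih =>
    intro d u h
    have h1 := pvInc_total d u v h
    have h2 := pvInc_inv d u v h
    have h3 := ih (pvInc d u v) u h2
    refine ⟨?_, by simpa using h3.2⟩
    rw [List.foldl_cons, h3.1, h1, List.length_cons]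
    push_cast
    ring

lemma pvBlock_total (us tl : List Int) :
    ∀ (d : PySem.Dict Int (PySem.Dict Int Int)), pvInv d →
    pvTotal (us.foldl (fun d u => tl.foldl (fun d v => pvInc d u v) d) d)
        = pvTotal d + (us.length * tl.length : Nat)
      ∧ pvInv (us.foldl (fun d u => tl.foldl (fun d v => pvInc d u v) d) d) := by
  induction us with
  | nil => intro d h; exact ⟨by simp, by simpa using h⟩
  | cons u rest ih =>
    intro d h
    have h1 := pvRow_total tl d u h
    have h3 := ih (tl.foldl (fun d v => pvInc d u v) d) h1.2
    refine ⟨?_, by simpa using h3.2⟩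
    rw [List.foldl_cons, h3.1, h1.1, List.length_cons]
    push_cast
    ring

-- A's u-slice at step i (tw ≠ 0): the flattened window — or ALL active nodes when it is empty
lemma pvSliceA_char (tw : Int) (cl : List (List Int)) (i : Nat) (h : tw ≠ 0) :
    PySem.List.slice ((cl.take i).flatten)
        (some (-((pvBW tw cl i).foldl (· + ·) 0))) none
      = if ((cl.take i).drop (i - (max tw 1).toNat)).flatten = []
        then (cl.take i).flatten
        else ((cl.take i).drop (i - (max tw 1).toNat)).flatten := by
  rw [pvBW_sum tw cl i h]
  set W := (max tw 1).toNat
  set win := (cl.take i).drop (i - W) with hwin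
  rcases hn : win.flatten.length with _ | m
  · rw [if_pos (List.eq_nil_of_length_eq_zero hn)]
    norm_num [PySem.List.slice_none_none]
  · rw [if_neg (by intro he; rw [he] at hn; simp at hn)]
    rw [PySem.List.slice_from_neg_natCast _ (m+1) (Nat.succ_pos m),
      pvTake_split cl i (i - W) (Nat.sub_le _ _), List.length_append, hn]
    have hlen : (cl.take (i - W)).flatten.length + (m+1) - (m+1)
        = (cl.take (i - W)).flatten.length := by omega
    rw [hlen, List.drop_left]

lemma pvStepB_total (tw : Int) (cl : List (List Int)) (i : Nat) (h : tw ≠ 0)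
    (d : PySem.Dict Int (PySem.Dict Int Int)) (hd : pvInv d) :
    pvTotal (pvStepB tw cl d (i:Int))
        = pvTotal d + (((cl.take i).drop (i - (max tw 1).toNat)).flatten.length
            * (PySem.List.pyGetD cl (i:Int) []).length : Nat)
      ∧ pvInv (pvStepB tw cl d (i:Int)) := by
  have hrw : pvStepB tw cl d (i:Int)
      = (((cl.take i).drop (if tw = 0 then 0 else i - (max tw 1).toNat)).flatten).foldl
          (fun d u => (PySem.List.pyGetD cl (i:Int) []).foldl (fun d v => pvInc d u v) d) d := by
    simp only [pvStepB, pvSlice_win, List.foldl_flatten]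
  rw [hrw, if_neg h]
  exact pvBlock_total _ _ d hd

def pvBadStep (tw : Int) (cl : List (List Int)) (i : Nat) : Prop :=
  cl.getD i [] ≠ [] ∧ ((cl.take i).drop (i - (max tw 1).toNat)).flatten = []
    ∧ (cl.take (i - (max tw 1).toNat)).flatten ≠ []

lemma pvLoop_ge (tw : Int) (h : tw ≠ 0) (cl : List (List Int)) :
    ∀ (n i : Nat) (dA dB : PySem.Dict Int (PySem.Dict Int Int)) (c : Int),
    i + n = cl.length → 1 ≤ i → pvInv dA → pvInv dB → pvTotal dA ≥ pvTotal dB + c →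
    pvTotal (((cl.drop i).foldl (pvStepA 1) (dA, (cl.take i).flatten, pvBW tw cl i)).1)
      ≥ pvTotal ((PySem.List.pyRange (i:Int) (cl.length:Int) 1).foldl (pvStepB tw cl) dB) + c
    ∧ pvInv (((cl.drop i).foldl (pvStepA 1) (dA, (cl.take i).flatten, pvBW tw cl i)).1)
    ∧ pvInv ((PySem.List.pyRange (i:Int) (cl.length:Int) 1).foldl (pvStepB tw cl) dB) := by
  intro n
  induction n with
  | zero =>
    intro i dA dB c hlen h1 hA hB hge
    rw [List.drop_eq_nil_of_le (by omega),
      PySem.List.pyRange_one_eq_nil (by exact_mod_cast (by omega : cl.length ≤ i))]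
    exact ⟨hge, hA, hB⟩
  | succ n ih =>
    intro i dA dB c hlen h1 hA hB hge
    have hi : i < cl.length := by omega
    rw [List.drop_eq_getElem_cons hi,
      PySem.List.pyRange_one_cons (by exact_mod_cast hi)]
    simp only [List.foldl_cons]
    have hact : (cl.take i).flatten ++ cl[i] = (cl.take (i+1)).flatten := by
      rw [List.take_succ_eq_append_getElem hi, List.flatten_append]; simp
    have hbw : (1 : Int) * ((cl[i].length : Nat) : Int) :: (pvBW tw cl i).dropLast
        = pvBW tw cl (i+1) := by
      rw [pvBW_succ tw cl i hi, List.getD_eq_getElem cl [] hi]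
      simp [h]
    have hstA : pvStepA 1 (dA, (cl.take i).flatten, pvBW tw cl i) cl[i]
        = ((PySem.List.slice ((cl.take i).flatten)
              (some (-((pvBW tw cl i).foldl (· + ·) 0))) none).foldl
            (fun d u => cl[i].foldl (fun d v => pvInc d u v) d) dA,
           (cl.take (i+1)).flatten, pvBW tw cl (i+1)) := by
      simp only [pvStepA]
      rw [hact, hbw]
    rw [hstA]
    have hAtot := pvBlock_total (PySem.List.slice ((cl.take i).flatten)
        (some (-((pvBW tw cl i).foldl (· + ·) 0))) none) cl[i] dA hA
    have hBtot := pvStepB_total tw cl i h dB hB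
    have htlist : PySem.List.pyGetD cl (i:Int) [] = cl[i] := by
      simp
      exact List.getElem?_eq_getElem hi ▸ rfl
    have hslice := pvSliceA_char tw cl i h
    have hge' : pvTotal ((PySem.List.slice ((cl.take i).flatten)
          (some (-((pvBW tw cl i).foldl (· + ·) 0))) none).foldl
          (fun d u => cl[i].foldl (fun d v => pvInc d u v) d) dA)
        ≥ pvTotal (pvStepB tw cl dB (i:Int)) + c := by
      rw [hAtot.1, hBtot.1, htlist]
      by_cases hwe : ((cl.take i).drop (i - (max tw 1).toNat)).flatten = []
      · rw [hslice, if_pos hwe, hwe]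
        simp only [List.length_nil, Nat.zero_mul]
        have : (0:Int) ≤ ((((cl.take i).flatten.length * cl[i].length) : Nat) : Int) := by
          positivity
        omega
      · rw [hslice, if_neg hwe]
        omega
    have hcast : ((i+1 : Nat) : Int) = (i : Int) + 1 := by push_cast; ring
    have := ih (i+1) _ (pvStepB tw cl dB (i:Int)) c (by omega) (by omega)
      (by rw [hslice] at hAtot ⊢; exact hAtot.2) hBtot.2 hge'
    rw [hcast] at this
    exact this

lemma pvLoop_gt (tw : Int) (h : tw ≠ 0) (cl : List (List Int)) :
    ∀ (n i : Nat) (dA dB : PySem.Dict Int (PySem.Dict Int Int)) (c : Int),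
    i + n = cl.length → 1 ≤ i → pvInv dA → pvInv dB →
    (∃ j, i ≤ j ∧ j < cl.length ∧ pvBadStep tw cl j) →
    pvTotal dA ≥ pvTotal dB + c →
    pvTotal (((cl.drop i).foldl (pvStepA 1) (dA, (cl.take i).flatten, pvBW tw cl i)).1)
      ≥ pvTotal ((PySem.List.pyRange (i:Int) (cl.length:Int) 1).foldl (pvStepB tw cl) dB)
        + (c + 1)
    ∧ pvInv (((cl.drop i).foldl (pvStepA 1) (dA, (cl.take i).flatten, pvBW tw cl i)).1)
    ∧ pvInv ((PySem.List.pyRange (i:Int) (cl.length:Int) 1).foldl (pvStepB tw cl) dB) := by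
  intro n
  induction n with
  | zero =>
    intro i dA dB c hlen h1 hA hB hex hge
    obtain ⟨j, hj1, hj2, _⟩ := hex
    omega
  | succ n ih =>
    intro i dA dB c hlen h1 hA hB hex hge
    have hi : i < cl.length := by omega
    rw [List.drop_eq_getElem_cons hi,
      PySem.List.pyRange_one_cons (by exact_mod_cast hi)]
    simp only [List.foldl_cons]
    have hact : (cl.take i).flatten ++ cl[i] = (cl.take (i+1)).flatten := by
      rw [List.take_succ_eq_append_getElem hi, List.flatten_append]; simp
    have hbw : (1 : Int) * ((cl[i].length : Nat) : Int) :: (pvBW tw cl i).dropLast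
        = pvBW tw cl (i+1) := by
      rw [pvBW_succ tw cl i hi, List.getD_eq_getElem cl [] hi]
      simp [h]
    have hstA : pvStepA 1 (dA, (cl.take i).flatten, pvBW tw cl i) cl[i]
        = ((PySem.List.slice ((cl.take i).flatten)
              (some (-((pvBW tw cl i).foldl (· + ·) 0))) none).foldl
            (fun d u => cl[i].foldl (fun d v => pvInc d u v) d) dA,
           (cl.take (i+1)).flatten, pvBW tw cl (i+1)) := by
      simp only [pvStepA]
      rw [hact, hbw]
    rw [hstA]
    have hAtot := pvBlock_total (PySem.List.slice ((cl.take i).flatten)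
        (some (-((pvBW tw cl i).foldl (· + ·) 0))) none) cl[i] dA hA
    have hBtot := pvStepB_total tw cl i h dB hB
    have htlist : PySem.List.pyGetD cl (i:Int) [] = cl[i] := by
      simp
      exact List.getElem?_eq_getElem hi ▸ rfl
    have hslice := pvSliceA_char tw cl i h
    have hcast : ((i+1 : Nat) : Int) = (i : Int) + 1 := by push_cast; ring
    by_cases hbad : pvBadStep tw cl i
    · -- the over-counting step: A gains at least one extra increment
      obtain ⟨hb1, hb2, hb3⟩ := hbad
      have hge' : pvTotal ((PySem.List.slice ((cl.take i).flatten)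
            (some (-((pvBW tw cl i).foldl (· + ·) 0))) none).foldl
            (fun d u => cl[i].foldl (fun d v => pvInc d u v) d) dA)
          ≥ pvTotal (pvStepB tw cl dB (i:Int)) + (c + 1) := by
        rw [hAtot.1, hBtot.1, htlist, hslice, if_pos hb2, hb2]
        have hsplit := pvTake_split cl i (i - (max tw 1).toNat) (Nat.sub_le _ _)
        have hlenact : 1 ≤ (cl.take i).flatten.length := by
          rw [hsplit, hb2, List.length_append]
          have := List.length_pos_of_ne_nil hb3
          omega
        have hlentl : 1 ≤ cl[i].length := by
          have : cl[i] ≠ [] := by rwa [List.getD_eq_getElem cl [] hi] at hb1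
          exact List.length_pos_of_ne_nil this
        have hprod : 1 ≤ ((cl.take i).flatten.length * cl[i].length : Nat) := by
          exact Nat.one_le_iff_ne_zero.mpr (by positivity)
        simp only [List.length_nil, Nat.zero_mul]
        have : (1:Int) ≤ (((cl.take i).flatten.length * cl[i].length : Nat) : Int) := by
          exact_mod_cast hprod
        omega
      have := pvLoop_ge tw h cl n (i+1) _ (pvStepB tw cl dB (i:Int)) (c+1) (by omega)
        (by omega) (by rw [hslice] at hAtot ⊢; exact hAtot.2) hBtot.2 hge'
      rw [hcast] at this
      exact this
    · -- ordinary step, the bad index is further right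
      obtain ⟨j, hj1, hj2, hj3⟩ := hex
      have hjne : j ≠ i := fun he => hbad (he ▸ hj3)
      have hge' : pvTotal ((PySem.List.slice ((cl.take i).flatten)
            (some (-((pvBW tw cl i).foldl (· + ·) 0))) none).foldl
            (fun d u => cl[i].foldl (fun d v => pvInc d u v) d) dA)
          ≥ pvTotal (pvStepB tw cl dB (i:Int)) + c := by
        rw [hAtot.1, hBtot.1, htlist]
        by_cases hwe : ((cl.take i).drop (i - (max tw 1).toNat)).flatten = []
        · rw [hslice, if_pos hwe, hwe]
          simp only [List.length_nil, Nat.zero_mul]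
          have : (0:Int) ≤ ((((cl.take i).flatten.length * cl[i].length) : Nat) : Int) := by
            positivity
          omega
        · rw [hslice, if_neg hwe]
          omega
      have := ih (i+1) _ (pvStepB tw cl dB (i:Int)) c (by omega) (by omega)
        (by rw [hslice] at hAtot ⊢; exact hAtot.2) hBtot.2 ⟨j, by omega, hj2, hj3⟩ hge'
      rw [hcast] at this
      exact this

lemma pvCascadeA_as_loop (tw : Int) (h : tw ≠ 0) (d : PySem.Dict Int (PySem.Dict Int Int))
    (g : List Int) (rest : List (List Int)) :
    pvCascadeA tw d (g :: rest)
      = (((g :: rest).drop 1).foldl (pvStepA 1)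
          (d, ((g :: rest).take 1).flatten, pvBW tw (g :: rest) 1)).1 := by
  have h0 : (PySem.List.pyGet? (g :: rest) 0).getD [] = g := by
    simp [PySem.List.pyGet?, PySem.List.pyIdx?]
  have hslice : PySem.List.slice (g :: rest) (some 1) none = (g :: rest).drop 1 := by
    rw [PySem.List.slice_from_one]; rfl
  have hbw : [(if tw ≠ 0 then (1:Int) else 0) * ((g.length : Nat) : Int)]
      ++ List.replicate (tw - 1).toNat 0 = pvBW tw (g :: rest) 1 := by
    have hW1 : 1 ≤ (max tw 1).toNat := pvW_pos tw
    have hW0 : (0:Int) ≤ max tw 1 := le_trans zero_le_one (le_max_right _ _)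
    have htN : (tw - 1).toNat = (max tw 1).toNat - 1 := by
      have := Int.toNat_of_nonneg hW0
      omega
    simp [h, pvBW, htN]
  have hta : (if tw ≠ 0 then (1:Int) else 0) = 1 := by simp [h]
  simp only [pvCascadeA]
  rw [h0, hslice]
  have hstate : ((d, g, [(if tw ≠ 0 then (1:Int) else 0) * ((g.length : Nat) : Int)]
        ++ List.replicate (tw - 1).toNat 0) :
        PySem.Dict Int (PySem.Dict Int Int) × List Int × List Int)
      = (d, ((g :: rest).take 1).flatten, pvBW tw (g :: rest) 1) := by
    rw [hbw]
    simp
  rw [hstate, hta]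

lemma pvCascade_ge (tw : Int) (h : tw ≠ 0) (cl : List (List Int)) (hne : cl ≠ [])
    (dA dB : PySem.Dict Int (PySem.Dict Int Int)) (c : Int)
    (hA : pvInv dA) (hB : pvInv dB) (hge : pvTotal dA ≥ pvTotal dB + c) :
    pvTotal (pvCascadeA tw dA cl)
      ≥ pvTotal ((PySem.List.pyRange 1 (cl.length : Int) 1).foldl (pvStepB tw cl) dB) + c
    ∧ pvInv (pvCascadeA tw dA cl)
    ∧ pvInv ((PySem.List.pyRange 1 (cl.length : Int) 1).foldl (pvStepB tw cl) dB) := by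
  obtain ⟨g, rest, rfl⟩ := List.exists_cons_of_ne_nil hne
  rw [pvCascadeA_as_loop tw h dA g rest]
  have := pvLoop_ge tw h (g :: rest) rest.length 1 dA dB c
    (by rw [List.length_cons]; omega) (le_refl 1) hA hB hge
  simpa using this

lemma pvCascade_gt (tw : Int) (h : tw ≠ 0) (cl : List (List Int)) (hne : cl ≠ [])
    (dA dB : PySem.Dict Int (PySem.Dict Int Int)) (c : Int)
    (hA : pvInv dA) (hB : pvInv dB)
    (hex : ∃ i : Nat, 1 ≤ i ∧ i < cl.length ∧ pvBadStep tw cl i)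
    (hge : pvTotal dA ≥ pvTotal dB + c) :
    pvTotal (pvCascadeA tw dA cl)
      ≥ pvTotal ((PySem.List.pyRange 1 (cl.length : Int) 1).foldl (pvStepB tw cl) dB) + (c + 1)
    ∧ pvInv (pvCascadeA tw dA cl)
    ∧ pvInv ((PySem.List.pyRange 1 (cl.length : Int) 1).foldl (pvStepB tw cl) dB) := by
  obtain ⟨g, rest, rfl⟩ := List.exists_cons_of_ne_nil hne
  rw [pvCascadeA_as_loop tw h dA g rest]
  obtain ⟨i, hi1, hi2, hi3⟩ := hex
  have := pvLoop_gt tw h (g :: rest) rest.length 1 dA dB c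
    (by rw [List.length_cons]; omega) (le_refl 1) hA hB ⟨i, hi1, hi2, hi3⟩ hge
  simpa using this

lemma pvFold_ge (tw : Int) (h : tw ≠ 0) :
    ∀ (ls : List (List (List Int))) (dA dB : PySem.Dict Int (PySem.Dict Int Int)) (c : Int),
    (∀ cc ∈ ls, cc ≠ []) → pvInv dA → pvInv dB → pvTotal dA ≥ pvTotal dB + c →
    pvTotal (ls.foldl (pvCascadeA tw) dA)
      ≥ pvTotal (ls.foldl (fun d cascade =>
          (PySem.List.pyRange 1 (cascade.length : Int) 1).foldl (pvStepB tw cascade) d) dB) + c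
    ∧ pvInv (ls.foldl (pvCascadeA tw) dA)
    ∧ pvInv (ls.foldl (fun d cascade =>
        (PySem.List.pyRange 1 (cascade.length : Int) 1).foldl (pvStepB tw cascade) d) dB) := by
  intro ls
  induction ls with
  | nil => intro dA dB c hpre hA hB hge; exact ⟨hge, hA, hB⟩
  | cons a ls ih =>
    intro dA dB c hpre hA hB hge
    simp only [List.foldl_cons]
    have h1 := pvCascade_ge tw h a (hpre a List.mem_cons_self) dA dB c hA hB hge
    exact ih _ _ c (fun cc hcc => hpre cc (List.mem_cons_of_mem a hcc)) h1.2.1 h1.2.2 h1.1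

lemma pvFold_gt (tw : Int) (h : tw ≠ 0) :
    ∀ (ls : List (List (List Int))) (dA dB : PySem.Dict Int (PySem.Dict Int Int)) (c : Int),
    (∀ cc ∈ ls, cc ≠ []) → pvInv dA → pvInv dB →
    (∃ cc ∈ ls, ∃ i : Nat, 1 ≤ i ∧ i < cc.length ∧ pvBadStep tw cc i) →
    pvTotal dA ≥ pvTotal dB + c →
    pvTotal (ls.foldl (pvCascadeA tw) dA)
      ≥ pvTotal (ls.foldl (fun d cascade =>
          (PySem.List.pyRange 1 (cascade.length : Int) 1).foldl (pvStepB tw cascade) d) dB)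
        + (c + 1) := by
  intro ls
  induction ls with
  | nil => intro dA dB c hpre hA hB hex hge; obtain ⟨cc, hcc, _⟩ := hex; simp at hcc
  | cons a ls ih =>
    intro dA dB c hpre hA hB hex hge
    simp only [List.foldl_cons]
    obtain ⟨cc, hcc, hbad⟩ := hex
    rcases List.mem_cons.mp hcc with rfl | hcc'
    · have h1 := pvCascade_gt tw h cc (hpre cc List.mem_cons_self) dA dB c hA hB hbad hge
      exact (pvFold_ge tw h ls _ _ (c+1)
        (fun c2 hc2 => hpre c2 (List.mem_cons_of_mem cc hc2)) h1.2.1 h1.2.2 h1.1).1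
    · have h1 := pvCascade_ge tw h a (hpre a List.mem_cons_self) dA dB c hA hB hge
      exact ih _ _ c (fun c2 hc2 => hpre c2 (List.mem_cons_of_mem a hc2)) h1.2.1 h1.2.2
        ⟨cc, hcc', hbad⟩ h1.1

lemma pvInv_empty : pvInv PySem.Dict.empty := by
  constructor
  · exact PySem.Dict.nodup_keys_empty
  · intro p hp
    simp [PySem.Dict.empty] at hp

theorem counting_weight_tight : Claim_exact_counting_weight := by
  intro cascades tw _ hpre hD hEq
  unfold D_counting_weight at hD
  obtain ⟨htw, c0, hc0, i, hiR, h1i, hb1, hb2, hb3⟩ := hD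
  have hgt := pvFold_gt tw htw cascades PySem.Dict.empty PySem.Dict.empty 0 hpre
    pvInv_empty pvInv_empty
    ⟨c0, hc0, i, h1i, List.mem_range.mp hiR, hb1, hb2, hb3⟩ (by omega)
  have hsum := congrArg
    (fun out : List (Int × List (Int × Int)) =>
      (out.map (fun p => (p.2.map (fun q => q.2)).sum)).sum) hEq
  have hA : (((counting_weight cascades tw).map
        (fun p => (p.2.map (fun q => q.2)).sum)).sum)
      = pvTotal (cascades.foldl (pvCascadeA tw) PySem.Dict.empty) := by
    simp [counting_weight, pvTotal, pvSumV, List.map_map]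
    rfl
  have hB : (((counting_weight_alt cascades tw).map
        (fun p => (p.2.map (fun q => q.2)).sum)).sum)
      = pvTotal (cascades.foldl (fun d cascade =>
          (PySem.List.pyRange 1 (cascade.length : Int) 1).foldl (pvStepB tw cascade) d)
          PySem.Dict.empty) := by
    simp [counting_weight_alt, pvTotal, pvSumV, List.map_map]
    rfl
  simp only at hsum
  rw [hA, hB] at hsum
  omega

theorem counting_weight_spec : Claim_unchanged_counting_weight := by
  intro cascades tw _ hpre hnd
  unfold D_counting_weight at hnd
  have hok : ∀ c ∈ cascades, tw = 0 ∨ ∀ i : Nat, 1 ≤ i → i < c.length →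
      ¬(c.getD i [] ≠ [] ∧ ((c.take i).drop (i - (max tw 1).toNat)).flatten = []
        ∧ (c.take (i - (max tw 1).toNat)).flatten ≠ []) := by
    intro c hc
    by_cases h : tw = 0
    · exact Or.inl h
    · refine Or.inr fun i h1 hi hbad =>
        hnd ⟨h, c, hc, i, List.mem_range.mpr hi, h1, hbad.1, hbad.2.1, hbad.2.2⟩
  have hdict : cascades.foldl (pvCascadeA tw) PySem.Dict.empty
      = cascades.foldl
          (fun d cascade =>
            (PySem.List.pyRange 1 (cascade.length : Int) 1).foldl (pvStepB tw cascade) d)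
          PySem.Dict.empty := by
    apply PySem.List.foldl_congr_mem
    intro d c hc
    exact pvCascade_eq tw c (hpre c hc) (hok c hc) d
  unfold counting_weight counting_weight_alt
  rw [hdict]

theorem counting_weight_changed : Claim_changed_counting_weight := by
  unfold Claim_changed_counting_weight; decide
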